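-- pv_equiv track=rewrite | github.com/synarete/dotfiles | tools/cstylechecker.py | has_mixed_case
-- ===== SOURCE A (Python) =====
-- def has_mixed_case(tok):
--     '''Returns True if a token consists of mixed upper/lower characters
--        If a token is a combination of two or more sub-tokens (e.g., system
--        defines such as SYS_gettid), check each sub-token.
--     '''
--     if '_' in tok:
--         for t in tok.split('_'):
--             if has_mixed_case(t):
--                 return True
--     else:
--         (has_lower, has_upper) = (False, False)
--         for c in tok:
--             if c.islower():
--                 has_lower = True
--             if c.isupper():
--                 has_upper = True
--             if has_lower and has_upper:
--                 return True
--     return False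
-- ===== SOURCE B (Python) =====
-- def has_mixed_case(tok):
--     '''Single linear scan: reset flags at each '_' (sub-token boundary).'''
--     has_lower = False
--     has_upper = False
--     for c in tok:
--         if c == '_':
--             has_lower = False
--             has_upper = False
--             continue
--         if c.islower():
--             has_lower = True
--         if c.isupper():
--             has_upper = True
--         if has_lower and has_upper:
--             return True
--     return False
-- ===== Notes on version B (the rewrite author's own statement) =====
-- stated objective: simpler
-- what changed: Replaced the recursive split-on-underscore-and-recheck strategy by a single linear scan that resets the lower/upper flags at each sub-token boundary, removing the recursion and the intermediate list of sub-tokens.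
import Mathlib
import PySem

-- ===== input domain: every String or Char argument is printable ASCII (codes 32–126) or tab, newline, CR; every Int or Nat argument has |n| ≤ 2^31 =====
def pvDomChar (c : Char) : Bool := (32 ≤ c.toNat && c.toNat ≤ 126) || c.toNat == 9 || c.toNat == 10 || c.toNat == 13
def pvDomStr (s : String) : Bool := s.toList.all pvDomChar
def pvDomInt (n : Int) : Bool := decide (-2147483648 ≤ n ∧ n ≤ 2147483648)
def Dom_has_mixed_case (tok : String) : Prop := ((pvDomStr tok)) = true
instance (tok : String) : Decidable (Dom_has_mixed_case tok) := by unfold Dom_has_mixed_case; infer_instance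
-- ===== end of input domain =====

-- B replaces A's recursive split('_')-and-recheck by one linear scan resetting the
-- case flags at each underscore (simpler; same O(n) cost).

-- ===== PORT A =====
-- A's inner for-loop over the characters of an underscore-free token:
-- flags (has_lower, has_upper), early return True when both are set.
def pvRunA : List Char → Bool → Bool → Bool
  | [], _, _ => false
  | c :: rest, hl, hu =>
    let hl := if PySem.Chars.islower c then true else hl
    let hu := if PySem.Chars.isupper c then true else hu
    if hl && hu then true else pvRunA rest hl hu

-- A's recursion, made total with fuel (the recursion's depth is bounded by the
-- string length; the fuel guard is never reached on any input).
def pvGoA : Nat → List Char → Bool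
  | 0, _ => false
  | fuel + 1, l =>
    if PySem.Chars.isIn ['_'] l then
      (PySem.Chars.splitOn l ['_']).any (fun t => pvGoA fuel t)
    else
      pvRunA l false false

def has_mixed_case (tok : String) : Bool := pvGoA (tok.toList.length + 1) tok.toList

-- ===== PORT B =====
-- B's single scan: reset both flags at '_', set them on lower/upper, early return.
def pvScanB : List Char → Bool → Bool → Bool
  | [], _, _ => false
  | c :: rest, hl, hu =>
    if c = '_' then pvScanB rest false false
    else
      let hl := if PySem.Chars.islower c then true else hl
      let hu := if PySem.Chars.isupper c then true else hu
      if hl && hu then true else pvScanB rest hl hu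

def has_mixed_case_alt (tok : String) : Bool := pvScanB tok.toList false false

-- ===== PRECONDITION & SPEC =====
def Spec_has_mixed_case (tok : String) (out : Bool) : Prop := out = has_mixed_case_alt tok
instance (tok : String) (out : Bool) : Decidable (Spec_has_mixed_case tok out) := by unfold Spec_has_mixed_case; infer_instance

-- ===== CLAIM (what is proved, stated in full; the proofs are below) =====
def Claim_equal_has_mixed_case : Prop := ∀ (tok : String), Dom_has_mixed_case tok → Spec_has_mixed_case tok (has_mixed_case tok)

-- ===== LEMMAS AND PROOFS =====

-- Proof-side characterisation of split('_'): the parts, accumulating the current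
-- (reversed) part in `cur`.
def pvParts : List Char → List Char → List (List Char)
  | [], cur => [cur.reverse]
  | c :: rest, cur => if c = '_' then cur.reverse :: pvParts rest [] else pvParts rest (c :: cur)

theorem pvGo_eq_parts (l : List Char) : ∀ (fuel : Nat) (cur : List Char) (acc : List (List Char)),
    l.length ≤ fuel →
    PySem.Chars.splitOn.go ['_'] fuel l cur acc = acc.reverse ++ pvParts l cur := by
  induction l with
  | nil =>
    intro fuel cur acc _
    cases fuel <;> simp [PySem.Chars.splitOn.go, pvParts]
  | cons c rest ih =>
    intro fuel cur acc hfuel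
    cases fuel with
    | zero => simp at hfuel
    | succ f =>
      by_cases hc : c = '_'
      · subst hc
        simp only [PySem.Chars.splitOn.go, List.isPrefixOf, beq_self_eq_true, Bool.true_and,
          if_true]
        have hd : List.drop (['_'] : List Char).length ('_' :: rest) = rest := rfl
        rw [hd, ih f [] (cur.reverse :: acc) (by simpa using hfuel)]
        simp [pvParts]
      · have hpre : List.isPrefixOf ['_'] (c :: rest) = false := by
          simp [List.isPrefixOf]
          exact fun h => absurd h.symm hc
        simp only [PySem.Chars.splitOn.go, hpre, Bool.false_eq_true, if_false]
        rw [ih f (c :: cur) acc (by simpa using Nat.le_of_succ_le_succ hfuel)]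
        simp [pvParts, hc]

theorem pvSplitOn_eq_parts (l : List Char) :
    PySem.Chars.splitOn l ['_'] = pvParts l [] := by
  have := pvGo_eq_parts l (l.length + 1) [] [] (Nat.le_succ _)
  simpa [PySem.Chars.splitOn] using this

-- the head of pvParts l cur extends cur.reverse
theorem pvParts_head (l : List Char) : ∀ (cur : List Char),
    ∃ y t, pvParts l cur = (cur.reverse ++ y) :: t := by
  induction l with
  | nil => intro cur; exact ⟨[], [], by simp [pvParts]⟩
  | cons c rest ih =>
    intro cur
    by_cases hc : c = '_'
    · exact ⟨[], pvParts rest [], by simp [pvParts, hc]⟩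
    · obtain ⟨y, t, hy⟩ := ih (c :: cur)
      exact ⟨c :: y, t, by simp [pvParts, hc, hy]⟩

-- no part of pvParts contains '_' (when the accumulator does not)
theorem pvParts_no_underscore (l : List Char) : ∀ (cur : List Char), '_' ∉ cur →
    ∀ p ∈ pvParts l cur, '_' ∉ p := by
  induction l with
  | nil =>
    intro cur hcur p hp
    simp [pvParts] at hp
    simpa [hp] using hcur
  | cons c rest ih =>
    intro cur hcur p hp
    by_cases hc : c = '_'
    · simp [pvParts, hc] at hp
      rcases hp with hp | hp
      · simpa [hp] using hcur
      · exact ih [] (by simp) p hp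
    · simp [pvParts, hc] at hp
      exact ih (c :: cur) (by simp [hcur, Ne.symm hc]) p hp

-- with no '_' in the remainder, pvParts is one single part
theorem pvParts_of_no_underscore (l : List Char) : ∀ (cur : List Char), '_' ∉ l →
    pvParts l cur = [cur.reverse ++ l] := by
  induction l with
  | nil => intro cur _; simp [pvParts]
  | cons c rest ih =>
    intro cur hl
    have hc : c ≠ '_' := fun h => hl (by simp [h])
    rw [pvParts, if_neg hc, ih (c :: cur) (fun h => hl (by simp [h]))]
    simp

-- main invariant: B's scan with flags (hl, hu) reached from the current partial
-- part `cur` equals "some part mixed" over the remaining parts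
theorem pvScan_eq_parts (l : List Char) : ∀ (hl hu : Bool) (cur : List Char),
    (hl && hu) = false →
    (∀ x, pvRunA (cur.reverse ++ x) false false = pvRunA x hl hu) →
    pvScanB l hl hu = (pvParts l cur).any (fun p => pvRunA p false false) := by
  induction l with
  | nil =>
    intro hl hu cur hf hinv
    have := hinv []
    simp [pvParts, pvScanB, pvRunA] at this ⊢
    simp [this]
  | cons c rest ih =>
    intro hl hu cur hf hinv
    by_cases hc : c = '_'
    · subst hc
      have h0 : pvRunA cur.reverse false false = false := by
        have := hinv []
        simpa [pvRunA] using this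
      rw [pvScanB, if_pos rfl, pvParts, if_pos rfl]
      simp only [List.any_cons, h0, Bool.false_or]
      exact ih false false [] (by simp) (fun x => by simp)
    · rw [pvScanB, if_neg hc, pvParts, if_neg hc]
      by_cases hb : ((if PySem.Chars.islower c then true else hl) &&
                     (if PySem.Chars.isupper c then true else hu)) = true
      · rw [if_pos hb]
        obtain ⟨y, t, hy⟩ := pvParts_head rest (c :: cur)
        have h2 : pvRunA (cur.reverse ++ (c :: y)) false false = true := by
          rw [hinv (c :: y), pvRunA, if_pos hb]
        simp [hy, h2]
      · rw [if_neg hb]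
        refine ih _ _ (c :: cur) (by simpa using hb) (fun x => ?_)
        have h1 : (c :: cur).reverse ++ x = cur.reverse ++ (c :: x) := by simp
        rw [h1, hinv (c :: x), pvRunA, if_neg hb]

theorem pvAlt_eq_parts (l : List Char) :
    pvScanB l false false = (pvParts l []).any (fun p => pvRunA p false false) :=
  pvScan_eq_parts l false false [] (by simp) (fun x => by simp)

theorem pvGoA_eq_parts (l : List Char) (fuel : Nat) (hfuel : l.length ≤ fuel) :
    pvGoA (fuel + 1) l = (pvParts l []).any (fun p => pvRunA p false false) := by
  rw [pvGoA]
  by_cases hin : PySem.Chars.isIn ['_'] l = true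
  · rw [if_pos hin, pvSplitOn_eq_parts]
    have hmem : '_' ∈ l := by
      rw [PySem.Chars.isIn_iff_infix] at hin
      exact (List.singleton_infix_iff _ _).1 hin
    have hne : l ≠ [] := by rintro rfl; simp at hmem
    obtain ⟨f, rfl⟩ : ∃ f, fuel = f + 1 := by
      cases fuel with
      | zero => exact absurd (Nat.le_zero.1 hfuel) (by simpa using hne)
      | succ f => exact ⟨f, rfl⟩
    refine PySem.List.any_congr_mem (fun p hp => ?_)
    have hnp : '_' ∉ p := pvParts_no_underscore l [] (by simp) p hp
    have hinp : PySem.Chars.isIn ['_'] p = false := by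
      rw [PySem.Chars.isIn_eq_false_iff]
      exact fun h => hnp ((List.singleton_infix_iff _ _).1 h)
    rw [pvGoA, if_neg (by simp [hinp])]
  · rw [if_neg hin]
    have hmem : '_' ∉ l := by
      rw [Bool.not_eq_true, PySem.Chars.isIn_eq_false_iff] at hin
      exact fun h => hin ((List.singleton_infix_iff _ _).2 h)
    rw [pvParts_of_no_underscore l [] hmem]
    simp

-- ===== VERDICT (by name: the statement is the Claim_ definition above) =====
theorem has_mixed_case_spec : Claim_equal_has_mixed_case := by
  intro tok _
  unfold Spec_has_mixed_case has_mixed_case has_mixed_case_alt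
  rw [pvGoA_eq_parts tok.toList tok.toList.length le_rfl, pvAlt_eq_parts]
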